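-- pv_equiv track=rewrite | github.com/topikuning/rasmara | backend/apps/core/management/commands/seed_initial_data.py | _expand_perms
-- ===== SOURCE A (Python) =====
-- def _expand_perms(patterns: list[str] | str, all_codes: set[str]) -> set[str]:
--     if patterns == "*":
--         return set(all_codes)
--     out: set[str] = set()
--     for pat in patterns:
--         if pat.endswith(".*"):
--             module = pat[:-2]
--             out.update({c for c in all_codes if c.startswith(module + ".")})
--         else:
--             if pat in all_codes:
--                 out.add(pat)
--     return out
-- ===== SOURCE B (Python) =====
-- def _expand_perms(patterns, all_codes):
--     if patterns == "*":
--         return set(all_codes)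
--     # index codes once by every dotted prefix; each wildcard pattern is then a dict lookup
--     by_prefix = {}
--     for c in all_codes:
--         for i, ch in enumerate(c):
--             if ch == '.':
--                 by_prefix.setdefault(c[:i], []).append(c)
--     out = set()
--     for pat in patterns:
--         if pat.endswith(".*"):
--             out.update(by_prefix.get(pat[:-2], []))
--         elif pat in all_codes:
--             out.add(pat)
--     return out
-- ===== Notes on version B (the rewrite author's own statement) =====
-- stated objective: alternative
-- what changed: Instead of rescanning all codes for every wildcard pattern, B builds a dict indexing the codes by every dotted prefix in one pass and answers each wildcard pattern with a single dict lookup; it trades per-pattern scans for an upfront indexing pass.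
import Mathlib
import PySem

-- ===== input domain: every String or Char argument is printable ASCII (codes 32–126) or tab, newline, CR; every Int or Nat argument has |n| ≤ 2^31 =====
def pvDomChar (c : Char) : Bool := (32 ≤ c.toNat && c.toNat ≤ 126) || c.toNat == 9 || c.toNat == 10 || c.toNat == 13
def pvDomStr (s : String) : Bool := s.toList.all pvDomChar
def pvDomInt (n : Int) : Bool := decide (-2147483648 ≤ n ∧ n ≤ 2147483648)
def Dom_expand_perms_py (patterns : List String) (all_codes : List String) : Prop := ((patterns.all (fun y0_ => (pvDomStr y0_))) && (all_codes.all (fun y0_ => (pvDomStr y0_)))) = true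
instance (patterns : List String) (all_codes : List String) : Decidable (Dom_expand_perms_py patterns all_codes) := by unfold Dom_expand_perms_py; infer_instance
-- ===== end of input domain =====

-- B indexes the codes once by every dotted prefix and answers each wildcard pattern with one
-- dict lookup instead of a scan of all codes (objective: alternative).

-- ===== PORT A =====
-- 'if patterns == "*"': for the list-typed input modelled here a Python list never equals a str,
-- so that branch cannot fire and is omitted.
def expand_perms_py (patterns : List String) (all_codes : List String) : List String :=
  patterns.foldl (fun out pat =>
    if PySem.Str.endswith pat ".*" then
      let module := PySem.Str.slice pat none (some (-2))
      PySem.Set.update out (all_codes.filter (fun c => PySem.Str.startswith c (module ++ ".")))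
    else
      if PySem.Set.contains all_codes pat then PySem.Set.add out pat else out)
    PySem.Set.empty

-- ===== PORT B =====
def expand_perms_py_alt (patterns : List String) (all_codes : List String) : List String :=
  let by_prefix : PySem.Dict String (List String) :=
    all_codes.foldl (fun d c =>
      (PySem.List.enumerate c.toList).foldl (fun d p =>
        if p.2 == '.' then
          d.modify (PySem.Str.slice c none (some p.1)) [] (fun l => l ++ [c])
        else d) d)
      PySem.Dict.empty
  patterns.foldl (fun out pat =>
    if PySem.Str.endswith pat ".*" then
      PySem.Set.update out (by_prefix.getD (PySem.Str.slice pat none (some (-2))) [])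
    else
      if PySem.Set.contains all_codes pat then PySem.Set.add out pat else out)
    PySem.Set.empty

-- ===== PRECONDITION & SPEC =====
def Spec_expand_perms_py (patterns : List String) (all_codes : List String) (out : List String) : Prop := out = expand_perms_py_alt patterns all_codes
instance (patterns : List String) (all_codes : List String) (out : List String) : Decidable (Spec_expand_perms_py patterns all_codes out) := by unfold Spec_expand_perms_py; infer_instance

-- ===== CLAIM (what is proved, stated in full; the proofs are below) =====
def Claim_equal_expand_perms_py : Prop := ∀ (patterns : List String) (all_codes : List String), Dom_expand_perms_py patterns all_codes → Spec_expand_perms_py patterns all_codes (expand_perms_py patterns all_codes)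

-- ===== LEMMAS AND PROOFS =====

lemma pv_dot_toList : ("." : String).toList = ['.'] := rfl

lemma pv_startswith_iff (c m : String) :
    PySem.Str.startswith c (m ++ ".") = true ↔ m.toList ++ ['.'] <+: c.toList := by
  rw [PySem.Str.startswith_eq, PySem.Chars.startswith_iff, String.toList_append, pv_dot_toList]

lemma pv_pred_iff (c m : String) (j : Int) (h0 : 0 ≤ j) (h1 : j < (c.toList.length : Int)) :
    (((PySem.Str.slice c none (some j) == m) && (PySem.List.pyGetD c.toList j '.' == '.')) = true)
      ↔ (j = (m.toList.length : Int) ∧ m.toList ++ ['.'] <+: c.toList) := by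
  rw [PySem.List.pyGetD_eq_getElem c.toList '.' h0 h1]
  simp only [Bool.and_eq_true, beq_iff_eq]
  constructor
  · rintro ⟨hs, hd⟩
    have hsl : List.take j.toNat c.toList = m.toList := by
      have h2 := congrArg String.toList hs
      rwa [PySem.Str.toList_slice, PySem.Chars.slice_eq_listSlice, PySem.List.slice_to _ h0] at h2
    have hjlt : j.toNat < c.toList.length := by omega
    have hk : j.toNat = m.toList.length := by
      have h3 := congrArg List.length hsl
      rw [List.length_take] at h3
      omega
    have ht : List.take (j.toNat + 1) c.toList = m.toList ++ ['.'] := by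
      rw [List.take_add_one, hsl, List.getElem?_eq_getElem hjlt, hd]
      rfl
    refine ⟨by omega, ?_⟩
    rw [← ht]
    exact List.take_prefix _ _
  · rintro ⟨hj, hpre⟩
    obtain ⟨t, ht⟩ := hpre
    have hk : j.toNat = m.toList.length := by omega
    have hcs : c.toList = m.toList ++ '.' :: t := by
      rw [← ht]; simp
    constructor
    · rw [← String.toList_inj, PySem.Str.toList_slice, PySem.Chars.slice_eq_listSlice,
        PySem.List.slice_to _ h0, hk, hcs]
      exact List.take_left ..
    · have : c.toList[j.toNat]? = some '.' := by
        rw [hcs, hk]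
        simp
      have hjlt : j.toNat < c.toList.length := by omega
      rw [List.getElem_eq_iff hjlt]
      exact this

lemma pv_key_filter (c m : String) :
    ((PySem.List.enumerate c.toList).filter
        (fun p => (PySem.Str.slice c none (some p.1) == m) && (p.2 == '.')))
      = if PySem.Str.startswith c (m ++ ".") then [((m.toList.length : Int), '.')] else [] := by
  rw [PySem.List.enumerate_eq_map_pyRange c.toList '.', List.filter_map, PySem.List.len_eq]
  set q : Int → Bool := ((fun p : Int × Char => (PySem.Str.slice c none (some p.1) == m) && (p.2 == '.')) ∘
      (fun j => (j, PySem.List.pyGetD c.toList j '.'))) with hqdef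
  have hq : ∀ j : Int, 0 ≤ j → j < (c.toList.length : Int) →
      (q j = true ↔ (j = (m.toList.length : Int) ∧ m.toList ++ ['.'] <+: c.toList)) := by
    intro j h0 h1
    rw [hqdef]
    simp only [Function.comp]
    exact pv_pred_iff c m j h0 h1
  by_cases hpre : m.toList ++ ['.'] <+: c.toList
  · have hlen : m.toList.length + 1 ≤ c.toList.length := by
      have := hpre.length_le
      simpa using this
    rw [if_pos ((pv_startswith_iff c m).mpr hpre)]
    rw [PySem.List.pyRange_one_append 0 (m.toList.length : Int) (c.toList.length : Int)
        (by positivity) (by exact_mod_cast by omega), List.filter_append]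
    rw [PySem.List.pyRange_one_cons (by exact_mod_cast by omega :
        (m.toList.length : Int) < (c.toList.length : Int)), List.filter_cons]
    have h1 : List.filter q (PySem.List.pyRange 0 (m.toList.length : Int)) = [] := by
      rw [List.filter_eq_nil_iff]
      intro j hj hb
      rw [PySem.List.mem_pyRange_one] at hj
      have := (hq j hj.1 (by omega)).mp hb
      omega
    have h3 : List.filter q (PySem.List.pyRange ((m.toList.length : Int) + 1) (c.toList.length : Int)) = [] := by
      rw [List.filter_eq_nil_iff]
      intro j hj hb
      rw [PySem.List.mem_pyRange_one] at hj
      have := (hq j (by omega) hj.2).mp hb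
      omega
    have h2 : q ((m.toList.length : Int)) = true :=
      (hq _ (by positivity) (by exact_mod_cast by omega)).mpr ⟨rfl, hpre⟩
    rw [h1, h2, h3]
    simp only [if_true, List.nil_append, List.map_cons, List.map_nil]
    have hd : PySem.List.pyGetD c.toList (m.toList.length : Int) '.' = '.' := by
      obtain ⟨t, ht⟩ := hpre
      have hcs : c.toList = m.toList ++ '.' :: t := by rw [← ht]; simp
      rw [PySem.List.pyGetD_eq_getElem c.toList '.' (by positivity) (by exact_mod_cast by omega)]
      rw [List.getElem_eq_iff (by omega), hcs]
      simp
    rw [hd]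
  · rw [if_neg (by rw [pv_startswith_iff]; exact hpre)]
    have h0 : List.filter q (PySem.List.pyRange 0 (c.toList.length : Int)) = [] := by
      rw [List.filter_eq_nil_iff]
      intro j hj hb
      rw [PySem.List.mem_pyRange_one] at hj
      exact hpre ((hq j hj.1 hj.2).mp hb).2
    rw [h0, List.map_nil]

lemma pv_step_getD (d : PySem.Dict String (List String)) (c m : String) :
    ((PySem.List.enumerate c.toList).foldl (fun d p =>
        if p.2 == '.' then
          d.modify (PySem.Str.slice c none (some p.1)) [] (fun l => l ++ [c])
        else d) d).getD m []
      = d.getD m [] ++ (if PySem.Str.startswith c (m ++ ".") then [c] else []) := by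
  have hfold :
      (PySem.List.enumerate c.toList).foldl (fun d p =>
        if p.2 == '.' then
          d.modify (PySem.Str.slice c none (some p.1)) [] (fun l => l ++ [c])
        else d) d
      = List.foldl (fun d p => d.modify p.1 [] (fun x => x ++ [p.2])) d
          (((PySem.List.enumerate c.toList).filter (fun p => p.2 == '.')).map
            (fun p => (PySem.Str.slice c none (some p.1), c))) := by
    rw [List.foldl_map, List.foldl_filter]
  rw [hfold, PySem.Dict.getD_foldl_modify_append]
  congr 1
  rw [List.filter_map, List.filter_filter, List.map_map]
  simp only [Function.comp]
  rw [pv_key_filter]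
  split_ifs <;> simp

-- The finished index, looked up at m, returns exactly A's scan of all_codes for prefix m ++ ".".
lemma pv_index_getD (codes : List String) (d : PySem.Dict String (List String)) (m : String) :
    (codes.foldl (fun d c =>
        (PySem.List.enumerate c.toList).foldl (fun d p =>
          if p.2 == '.' then
            d.modify (PySem.Str.slice c none (some p.1)) [] (fun l => l ++ [c])
          else d) d) d).getD m []
      = d.getD m [] ++ codes.filter (fun c => PySem.Str.startswith c (m ++ ".")) := by
  induction codes generalizing d with
  | nil => simp
  | cons c tl ih =>
      simp only [List.foldl_cons, ih, pv_step_getD, List.filter_cons]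
      split_ifs <;> simp

-- ===== VERDICT (by name: the statement is the Claim_ definition above) =====
theorem expand_perms_py_spec : Claim_equal_expand_perms_py := by
  intro patterns all_codes _
  unfold Spec_expand_perms_py expand_perms_py expand_perms_py_alt
  refine PySem.List.foldl_congr_mem _ _ _ _ ?_
  intro acc pat _
  by_cases h : PySem.Str.endswith pat ".*" = true
  · rw [if_pos h, if_pos h]
    rw [pv_index_getD]
    simp [PySem.Dict.getD]
  · rw [if_neg h, if_neg h]
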